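-- pv_equiv track=rewrite | github.com/anushka-singhal/Holiday-count-apps | count-holidays.py | count_holidays
-- ===== SOURCE A (Python) =====
-- def count_holidays(N, festival_days):
--     holidays = 0
--     for i in range(1, 31):
--         if i % 7 == 6 or i % 7 == 0:
--             holidays += 1
--         elif i in festival_days:
--             holidays += 1
--     return holidays
-- ===== SOURCE B (Python) =====
-- def count_holidays(N, festival_days):
--     weekends = {6, 7, 13, 14, 20, 21, 27, 28}
--     non_weekend = set(range(1, 31)) - weekends
--     return len(weekends) + len(non_weekend & set(festival_days))
-- ===== Notes on version B (the rewrite author's own statement) =====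
-- stated objective: simpler
-- what changed: Replaced the 30-iteration loop with per-day list membership tests by a fixed weekend set plus one set intersection: result = len(weekends) + len(non_weekend_days & set(festival_days)).
import Mathlib
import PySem

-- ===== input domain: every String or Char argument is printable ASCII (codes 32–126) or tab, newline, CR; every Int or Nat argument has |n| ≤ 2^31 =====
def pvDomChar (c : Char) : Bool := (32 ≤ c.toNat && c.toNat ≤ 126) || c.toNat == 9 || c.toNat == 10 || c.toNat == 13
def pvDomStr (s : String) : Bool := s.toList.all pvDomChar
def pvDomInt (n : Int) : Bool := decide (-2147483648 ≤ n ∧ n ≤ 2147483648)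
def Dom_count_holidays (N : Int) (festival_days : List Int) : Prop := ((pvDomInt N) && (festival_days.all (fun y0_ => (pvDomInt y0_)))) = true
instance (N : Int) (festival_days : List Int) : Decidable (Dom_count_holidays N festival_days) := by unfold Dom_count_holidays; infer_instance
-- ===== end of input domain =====

-- B replaces the 30-iteration loop by a closed weekend set plus one set intersection (simpler, no per-day loop).

-- ===== PORT A =====
def count_holidays (N : Int) (festival_days : List Int) : Int :=
  (PySem.List.pyRange 1 31 1).foldl
    (fun holidays i =>
      if PySem.Int.mod i 7 == 6 || PySem.Int.mod i 7 == 0 then holidays + 1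
      else if festival_days.contains i then holidays + 1
      else holidays) 0

-- ===== PORT B =====
def count_holidays_alt (N : Int) (festival_days : List Int) : Int :=
  let weekends : PySem.Set Int := PySem.Set.ofList [6, 7, 13, 14, 20, 21, 27, 28]
  let nonWeekend : PySem.Set Int :=
    PySem.Set.diff (PySem.Set.ofList (PySem.List.pyRange 1 31 1)) weekends
  (PySem.Set.len weekends : Int) +
    (PySem.Set.len (PySem.Set.inter nonWeekend (PySem.Set.ofList festival_days)) : Int)

-- ===== PRECONDITION & SPEC =====
def Spec_count_holidays (N : Int) (festival_days : List Int) (out : Int) : Prop := out = count_holidays_alt N festival_days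
instance (N : Int) (festival_days : List Int) (out : Int) : Decidable (Spec_count_holidays N festival_days out) := by unfold Spec_count_holidays; infer_instance

-- ===== CLAIM (what is proved, stated in full; the proofs are below) =====
def Claim_equal_count_holidays : Prop := ∀ (N : Int) (festival_days : List Int), Dom_count_holidays N festival_days → Spec_count_holidays N festival_days (count_holidays N festival_days)

-- ===== LEMMAS AND PROOFS =====

-- A's loop body increments iff (weekend i or i ∈ festival_days); the fold is a countP.
lemma fold_merge (fd : List Int) (l : List Int) (a : Int) :
    l.foldl (fun holidays i =>
      if PySem.Int.mod i 7 == 6 || PySem.Int.mod i 7 == 0 then holidays + 1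
      else if fd.contains i then holidays + 1
      else holidays) a
    = l.foldl (fun holidays i =>
        if (PySem.Int.mod i 7 == 6 || PySem.Int.mod i 7 == 0) || fd.contains i
        then holidays + 1 else holidays) a := by
  induction l generalizing a with
  | nil => rfl
  | cons x xs ih =>
    simp only [List.foldl_cons]
    rw [ih]
    have : (if (PySem.Int.mod x 7 == 6 || PySem.Int.mod x 7 == 0) = true then a + 1
        else if fd.contains x = true then a + 1 else a)
        = (if (PySem.Int.mod x 7 == 6 || PySem.Int.mod x 7 == 0 || fd.contains x) = true
           then a + 1 else a) := by
      simp only [Bool.or_eq_true, beq_iff_eq]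
      split_ifs <;> tauto
    rw [this]

-- the purely numeric core: countP over 1..30 vs 8 + countP over the 22 non-weekend days
lemma countP_core (fd : List Int) :
    (PySem.List.pyRange 1 31 1 |>.countP
        (fun i => (PySem.Int.mod i 7 == 6 || PySem.Int.mod i 7 == 0) || fd.contains i))
    = 8 + ([1, 2, 3, 4, 5, 8, 9, 10, 11, 12, 15, 16, 17, 18, 19, 22, 23, 24, 25, 26, 29, 30].countP
        (fun i => fd.contains i)) := by
  have hr : PySem.List.pyRange 1 31 1
      = [1, 2, 3, 4, 5, 6, 7, 8, 9, 10, 11, 12, 13, 14, 15, 16, 17, 18, 19, 20,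
         21, 22, 23, 24, 25, 26, 27, 28, 29, 30] := by decide
  rw [hr]
  simp only [List.countP_cons, List.countP_nil]
  norm_num [PySem.Int.mod, Int.fmod_eq_emod]
  ring

theorem count_holidays_spec : Claim_equal_count_holidays := by
  intro N fd _
  unfold Spec_count_holidays count_holidays count_holidays_alt
  rw [fold_merge, PySem.List.foldl_if_add_one]
  have hnw : PySem.Set.diff (PySem.Set.ofList (PySem.List.pyRange 1 31 1))
      (PySem.Set.ofList [6, 7, 13, 14, 20, 21, 27, 28])
      = [1, 2, 3, 4, 5, 8, 9, 10, 11, 12, 15, 16, 17, 18, 19, 22, 23, 24, 25, 26, 29, 30] := by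
    decide
  simp only []
  rw [hnw]
  have hc : ∀ x ∈ ([1, 2, 3, 4, 5, 8, 9, 10, 11, 12, 15, 16, 17, 18, 19, 22, 23, 24,
      25, 26, 29, 30] : List Int),
      (PySem.Set.ofList fd).contains x = fd.contains x := by
    intro x _
    rw [PySem.Set.contains_eq_listContains]
    by_cases h : x ∈ fd <;>
      simp [h, PySem.Set.mem_ofList]
  rw [PySem.Set.inter, List.filter_congr hc]
  simp only [PySem.Set.len]
  rw [← List.countP_eq_length_filter, countP_core fd]
  have h8 : (PySem.Set.ofList ([6, 7, 13, 14, 20, 21, 27, 28] : List Int)).length = 8 := by decide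
  rw [h8]
  push_cast
  ring
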